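-- pv_equiv track=rewrite | github.com/danielaik/imfcs-output-handler | src/imfcsoutputhandlerlib/util_filename.py | get_sorted_useful_filenames
-- ===== SOURCE A (Python) =====
-- def get_sorted_useful_filenames(input_list: list[str]) -> list[str]:
--     # find usable filename for analysis and sort .tif first followed by .xlsx second
--     filtered = []
--     for filename in input_list:
--         if filename.endswith("_AVR.tif") or (
--             filename.endswith(".xlsx") and not filename.endswith("_metadata.xlsx")
--         ):
--             filtered.append(filename)
--
--     sorted_files = sorted(filtered, key=lambda x: (not x.endswith(".tif"), x))
--
--     return sorted_files
-- ===== SOURCE B (Python) =====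
-- def _usable(filename: str) -> bool:
--     return filename.endswith("_AVR.tif") or (
--         filename.endswith(".xlsx") and not filename.endswith("_metadata.xlsx")
--     )
--
--
-- def get_sorted_useful_filenames(input_list: list[str]) -> list[str]:
--     # partition usable filenames into the two extension buckets, then sort
--     # each bucket by plain string order and put all .tif files first
--     tif_files = []
--     xlsx_files = []
--     for filename in input_list:
--         if _usable(filename):
--             if filename.endswith("_AVR.tif"):
--                 tif_files.append(filename)
--             else:
--                 xlsx_files.append(filename)
--     return sorted(tif_files) + sorted(xlsx_files)
-- ===== Notes on version B (the rewrite author's own statement) =====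
-- stated objective: simpler
-- what changed: Replaces the single stable sort under a composite (not-tif, name) tuple key by an explicit partition into a .tif bucket and an .xlsx bucket, each sorted by plain string order and concatenated tif-first.
import Mathlib
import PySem

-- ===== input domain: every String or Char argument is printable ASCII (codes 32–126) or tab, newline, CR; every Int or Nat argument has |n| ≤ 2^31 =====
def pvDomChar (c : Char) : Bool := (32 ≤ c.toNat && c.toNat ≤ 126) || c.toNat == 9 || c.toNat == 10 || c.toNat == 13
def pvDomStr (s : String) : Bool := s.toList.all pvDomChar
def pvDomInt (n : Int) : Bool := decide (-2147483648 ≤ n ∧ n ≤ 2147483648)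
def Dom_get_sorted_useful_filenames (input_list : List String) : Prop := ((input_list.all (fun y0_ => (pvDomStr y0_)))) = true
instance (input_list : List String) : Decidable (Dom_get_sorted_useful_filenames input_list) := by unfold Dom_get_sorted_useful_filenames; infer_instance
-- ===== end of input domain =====

-- B replaces A's single stable sort under a composite (not-tif, name) tuple key by an
-- explicit partition into a .tif bucket and an .xlsx bucket, each sorted by plain string
-- order and concatenated tif-first (objective: simpler).


-- ===== PORT A =====
def get_sorted_useful_filenames (input_list : List String) : List String :=
  let filtered := input_list.foldl (fun acc filename =>
    if PySem.Str.endswith filename "_AVR.tif" ||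
       (PySem.Str.endswith filename ".xlsx" && !PySem.Str.endswith filename "_metadata.xlsx")
    then acc ++ [filename] else acc) []
  PySem.List.sorted2 filtered (fun x => !PySem.Str.endswith x ".tif") (fun x => x)

-- ===== PORT B =====
-- helper of Source B: the filter predicate
def pvUsable (filename : String) : Bool :=
  PySem.Str.endswith filename "_AVR.tif" ||
    (PySem.Str.endswith filename ".xlsx" && !PySem.Str.endswith filename "_metadata.xlsx")

def get_sorted_useful_filenames_alt (input_list : List String) : List String :=
  let buckets := input_list.foldl (fun (acc : List String × List String) filename =>
    if pvUsable filename then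
      if PySem.Str.endswith filename "_AVR.tif" then (acc.1 ++ [filename], acc.2)
      else (acc.1, acc.2 ++ [filename])
    else acc) ([], [])
  PySem.List.sorted buckets.1 (fun x => x) ++ PySem.List.sorted buckets.2 (fun x => x)

-- ===== PRECONDITION & SPEC =====
def Spec_get_sorted_useful_filenames (input_list : List String) (out : List String) : Prop := out = get_sorted_useful_filenames_alt input_list
instance (input_list : List String) (out : List String) : Decidable (Spec_get_sorted_useful_filenames input_list out) := by unfold Spec_get_sorted_useful_filenames; infer_instance

-- ===== CLAIM (what is proved, stated in full; the proofs are below) =====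
def Claim_equal_get_sorted_useful_filenames : Prop := ∀ (input_list : List String), Dom_get_sorted_useful_filenames input_list → Spec_get_sorted_useful_filenames input_list (get_sorted_useful_filenames input_list)

-- ===== LEMMAS AND PROOFS =====

-- insertBy only looks at `before x ·` on members of the list
theorem pv_insertBy_congr {α : Type} (f g : α → α → Bool) (x : α) (ys : List α)
    (h : ∀ y ∈ ys, f x y = g x y) :
    PySem.List.insertBy f x ys = PySem.List.insertBy g x ys := by
  induction ys with
  | nil => rfl
  | cons y ys ih =>
    simp only [PySem.List.insertBy]
    rw [h y (by simp)]
    split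
    · rfl
    · rw [ih (fun z hz => h z (by simp [hz]))]

-- if x goes before everything in R, inserting into L ++ R inserts within L
theorem pv_insertBy_append_left {α : Type} (before : α → α → Bool) (x : α) (L R : List α)
    (h : ∀ r ∈ R, before x r = true) :
    PySem.List.insertBy before x (L ++ R) = PySem.List.insertBy before x L ++ R := by
  induction L with
  | nil =>
    cases R with
    | nil => rfl
    | cons r R' => simp [PySem.List.insertBy, h r (by simp)]
  | cons l L ih =>
    simp only [List.cons_append, PySem.List.insertBy]
    split
    · rfl
    · simp [ih]

-- if x goes before nothing in L, inserting into L ++ R inserts within R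
theorem pv_insertBy_append_right {α : Type} (before : α → α → Bool) (x : α) (L R : List α)
    (h : ∀ l ∈ L, before x l = false) :
    PySem.List.insertBy before x (L ++ R) = L ++ PySem.List.insertBy before x R := by
  induction L with
  | nil => rfl
  | cons l L ih =>
    simp only [List.cons_append, PySem.List.insertBy, h l (by simp)]
    simp only [Bool.false_eq_true, if_false]
    rw [ih (fun z hz => h z (by simp [hz]))]

-- Python's stable sort under the tuple key (bool, x) = sort the false-bucket ++ sort the true-bucket
theorem pv_sorted2_bool_split (k1 : String → Bool) (xs : List String) :
    PySem.List.sorted2 xs k1 (fun x => x) =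
      PySem.List.sorted (xs.filter (fun x => !k1 x)) (fun x => x) ++
      PySem.List.sorted (xs.filter k1) (fun x => x) := by
  induction xs using List.reverseRecOn with
  | nil => rfl
  | append_singleton xs x ih =>
    have hmemF : ∀ y ∈ PySem.List.sorted (xs.filter (fun x => !k1 x)) (fun x => x), k1 y = false := by
      intro y hy
      have := (PySem.List.mem_sorted _ _ _ _).mp hy
      simpa using (List.of_mem_filter this)
    have hmemT : ∀ y ∈ PySem.List.sorted (xs.filter k1) (fun x => x), k1 y = true := by
      intro y hy
      have := (PySem.List.mem_sorted _ _ _ _).mp hy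
      exact List.of_mem_filter this
    have hL : PySem.List.sorted2 (xs ++ [x]) k1 (fun x => x) =
        PySem.List.insertBy
          (fun a b => decide (k1 a < k1 b) || !decide (k1 b < k1 a) && decide (a < b)) x
          (PySem.List.sorted2 xs k1 (fun x => x)) := by
      simp [PySem.List.sorted2, List.foldl_append]
    have hS : ∀ ys : List String, ∀ z : String,
        PySem.List.sorted (ys ++ [z]) (fun x => x) =
          PySem.List.insertBy (fun a b => decide (a < b)) z (PySem.List.sorted ys (fun x => x)) := by
      intro ys z
      rw [PySem.List.sorted_eq_foldl_insertBy, PySem.List.sorted_eq_foldl_insertBy, List.foldl_append]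
      rfl
    rw [hL, ih]
    cases hx : k1 x with
    | false =>
      rw [List.filter_append, List.filter_append]
      simp only [List.filter_singleton, hx, Bool.not_false, cond_true, cond_false, List.append_nil]
      rw [hS, pv_insertBy_append_left _ x _ _ (by
        intro r hr
        simp [hmemT r hr, hx])]
      rw [pv_insertBy_congr _ (fun a b => decide (a < b)) x _ (by
        intro y hy
        simp [hmemF y hy, hx])]
    | true =>
      rw [List.filter_append, List.filter_append]
      simp only [List.filter_singleton, hx, Bool.not_true, cond_true, cond_false, List.append_nil]
      rw [hS, pv_insertBy_append_right _ x _ _ (by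
        intro l hl
        simp [hmemF l hl, hx])]
      rw [pv_insertBy_congr _ (fun a b => decide (a < b)) x _ (by
        intro y hy
        simp [hmemT y hy, hx])]

-- B's bucket loop computes the two filters
theorem pv_buckets (xs : List String) (acc : List String × List String) :
    xs.foldl (fun (acc : List String × List String) filename =>
      if pvUsable filename then
        if PySem.Str.endswith filename "_AVR.tif" then (acc.1 ++ [filename], acc.2)
        else (acc.1, acc.2 ++ [filename])
      else acc) acc =
    (acc.1 ++ xs.filter (fun x => pvUsable x && PySem.Str.endswith x "_AVR.tif"),
     acc.2 ++ xs.filter (fun x => pvUsable x && !PySem.Str.endswith x "_AVR.tif")) := by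
  induction xs generalizing acc with
  | nil => simp
  | cons x xs ih =>
    simp only [List.foldl_cons, List.filter_cons]
    cases hu : pvUsable x <;> cases ha : PySem.Str.endswith x "_AVR.tif" <;>
      simp only [Bool.false_and, Bool.true_and, Bool.not_true, Bool.not_false,
        Bool.false_eq_true, if_false, if_true, ih] <;>
      simp [List.append_assoc]

-- on a usable filename, ends-with ".tif" coincides with ends-with "_AVR.tif"
theorem pv_tif_eq_avr (x : String) (hu : pvUsable x = true) :
    PySem.Str.endswith x ".tif" = PySem.Str.endswith x "_AVR.tif" := by
  cases ha : PySem.Str.endswith x "_AVR.tif" with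
  | true =>
    have h1 : "_AVR.tif".toList <:+ x.toList := by
      have := (PySem.Chars.endswith_iff x.toList "_AVR.tif".toList).mp (by
        simpa [PySem.Str.endswith] using ha)
      exact this
    have h2 : ".tif".toList <:+ x.toList :=
      List.IsSuffix.trans (by decide) h1
    simp only [PySem.Str.endswith]
    exact (PySem.Chars.endswith_iff _ _).mpr h2
  | false =>
    have hx : PySem.Str.endswith x ".xlsx" = true := by
      simp only [pvUsable, ha, Bool.false_or, Bool.and_eq_true] at hu
      exact hu.1
    cases ht : PySem.Str.endswith x ".tif" with
    | false => rfl
    | true =>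
      exfalso
      have h1 : ".tif".toList <:+ x.toList :=
        (PySem.Chars.endswith_iff _ _).mp (by simpa [PySem.Str.endswith] using ht)
      have h2 : ".xlsx".toList <:+ x.toList :=
        (PySem.Chars.endswith_iff _ _).mp (by simpa [PySem.Str.endswith] using hx)
      rcases List.suffix_or_suffix_of_suffix h1 h2 with h | h
      · exact absurd h (by decide)
      · exact absurd h (by decide)

-- ===== VERDICT (by name: the statement is the Claim_ definition above) =====
theorem get_sorted_useful_filenames_spec : Claim_equal_get_sorted_useful_filenames := by
  intro input_list _
  unfold Spec_get_sorted_useful_filenames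
  unfold get_sorted_useful_filenames get_sorted_useful_filenames_alt
  simp only
  rw [PySem.List.foldl_append_if_eq_filter, List.nil_append]
  rw [pv_buckets, List.nil_append, List.nil_append]
  rw [pv_sorted2_bool_split]
  have hf1 : (input_list.filter pvUsable).filter (fun x => !!PySem.Str.endswith x ".tif") =
      input_list.filter (fun x => pvUsable x && PySem.Str.endswith x "_AVR.tif") := by
    rw [List.filter_filter]
    apply List.filter_congr
    intro x _
    cases hu : pvUsable x with
    | false => simp
    | true =>
      simp only [Bool.true_and, Bool.and_true, Bool.not_not]
      rw [pv_tif_eq_avr x hu]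
  have hf2 : (input_list.filter pvUsable).filter (fun x => !PySem.Str.endswith x ".tif") =
      input_list.filter (fun x => pvUsable x && !PySem.Str.endswith x "_AVR.tif") := by
    rw [List.filter_filter]
    apply List.filter_congr
    intro x _
    cases hu : pvUsable x with
    | false => simp
    | true =>
      simp only [Bool.true_and, Bool.and_true]
      rw [pv_tif_eq_avr x hu]
  rw [show (fun filename => PySem.Str.endswith filename "_AVR.tif" ||
        (PySem.Str.endswith filename ".xlsx" && !PySem.Str.endswith filename "_metadata.xlsx")) = pvUsable
      from rfl]
  rw [hf1, hf2]
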